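-- pv_equiv track=rewrite | github.com/sish-h/mirror-x | app.py | calculate_behavior_scores
-- ===== SOURCE A (Python) =====
-- def calculate_behavior_scores(df, patterns, hidden_patterns):
--     """Calculate behavior scores based on patterns"""
--     base_reality = 50
--     base_discipline = 50
--     base_avoidance = 50
--
--     # Adjust scores based on hidden patterns
--     for pattern in hidden_patterns:
--         if pattern['severity'] == 'high':
--             base_reality -= 15
--             base_discipline -= 15
--             base_avoidance += 20
--         elif pattern['severity'] == 'medium':
--             base_reality -= 8
--             base_discipline -= 8
--             base_avoidance += 10
--
--     # Ensure scores stay in valid range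
--     reality_score = max(0, min(100, base_reality))
--     discipline_score = max(0, min(100, base_discipline))
--     avoidance_score = max(0, min(100, base_avoidance))
--
--     return {
--         'reality_score': reality_score,
--         'discipline_score': discipline_score,
--         'avoidance_score': avoidance_score
--     }
-- ===== SOURCE B (Python) =====
-- def calculate_behavior_scores(df, patterns, hidden_patterns):
--     """Calculate behavior scores based on patterns"""
--     highs = sum(1 for p in hidden_patterns if p['severity'] == 'high')
--     mediums = sum(1 for p in hidden_patterns if p['severity'] == 'medium')
--     return {
--         'reality_score': max(0, min(100, 50 - 15 * highs - 8 * mediums)),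
--         'discipline_score': max(0, min(100, 50 - 15 * highs - 8 * mediums)),
--         'avoidance_score': max(0, min(100, 50 + 20 * highs + 10 * mediums)),
--     }
-- ===== Notes on version B (the rewrite author's own statement) =====
-- stated objective: simpler
-- what changed: Replaces the three-accumulator per-element loop with a count-then-closed-form computation: tally high/medium severities once, then derive each clamped score arithmetically from the two counts.
import Mathlib
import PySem

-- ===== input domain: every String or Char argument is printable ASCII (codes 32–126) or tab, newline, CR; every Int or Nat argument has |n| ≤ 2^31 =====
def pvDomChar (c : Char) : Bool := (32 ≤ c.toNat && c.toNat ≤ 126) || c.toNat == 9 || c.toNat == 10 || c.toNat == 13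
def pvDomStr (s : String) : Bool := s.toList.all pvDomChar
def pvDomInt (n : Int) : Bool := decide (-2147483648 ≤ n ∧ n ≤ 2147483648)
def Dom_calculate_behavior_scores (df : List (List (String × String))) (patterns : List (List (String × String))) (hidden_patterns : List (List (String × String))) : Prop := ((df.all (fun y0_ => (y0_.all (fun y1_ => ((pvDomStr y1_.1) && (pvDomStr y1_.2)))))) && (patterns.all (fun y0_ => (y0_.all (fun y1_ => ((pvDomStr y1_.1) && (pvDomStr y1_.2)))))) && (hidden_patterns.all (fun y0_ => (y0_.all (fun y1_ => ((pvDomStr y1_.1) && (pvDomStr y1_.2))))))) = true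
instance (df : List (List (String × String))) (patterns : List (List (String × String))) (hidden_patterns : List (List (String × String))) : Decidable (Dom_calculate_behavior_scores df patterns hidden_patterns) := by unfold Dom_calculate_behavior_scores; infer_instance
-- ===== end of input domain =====

-- B replaces the per-element three-accumulator loop with a count-then-closed-form computation (objective: simpler).

-- ===== PORT A =====
-- pattern['severity'] (KeyError = none, excluded by Pre_); inside Pre_ getD "" equals the Python lookup
def calculate_behavior_scores (df : List (List (String × String))) (patterns : List (List (String × String))) (hidden_patterns : List (List (String × String))) : List (String × Int) :=
  let st : Int × Int × Int := hidden_patterns.foldl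
    (fun (s : Int × Int × Int) pattern =>
      let sev := ((List.lookup "severity" pattern).getD "")
      if sev = "high" then (s.1 - 15, s.2.1 - 15, s.2.2 + 20)
      else if sev = "medium" then (s.1 - 8, s.2.1 - 8, s.2.2 + 10)
      else s)
    (50, 50, 50)
  [("reality_score", max 0 (min 100 st.1)),
   ("discipline_score", max 0 (min 100 st.2.1)),
   ("avoidance_score", max 0 (min 100 st.2.2))]

-- ===== PORT B =====
def calculate_behavior_scores_alt (df : List (List (String × String))) (patterns : List (List (String × String))) (hidden_patterns : List (List (String × String))) : List (String × Int) :=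
  let highs : Int := hidden_patterns.countP (fun p => ((List.lookup "severity" p).getD "") = "high")
  let mediums : Int := hidden_patterns.countP (fun p => ((List.lookup "severity" p).getD "") = "medium")
  [("reality_score", max 0 (min 100 (50 - 15 * highs - 8 * mediums))),
   ("discipline_score", max 0 (min 100 (50 - 15 * highs - 8 * mediums))),
   ("avoidance_score", max 0 (min 100 (50 + 20 * highs + 10 * mediums)))]

-- ===== PRECONDITION & SPEC =====
-- Pre_ excludes inputs where some hidden pattern lacks the 'severity' key: there the Python A raises KeyError.
def Pre_calculate_behavior_scores (df : List (List (String × String))) (patterns : List (List (String × String))) (hidden_patterns : List (List (String × String))) : Prop :=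
  ∀ p ∈ hidden_patterns, ((List.lookup "severity" p)).isSome
instance (df : List (List (String × String))) (patterns : List (List (String × String))) (hidden_patterns : List (List (String × String))) : Decidable (Pre_calculate_behavior_scores df patterns hidden_patterns) := by unfold Pre_calculate_behavior_scores; infer_instance
def pvWitness_calculate_behavior_scores : (List (List (String × String))) × (List (List (String × String))) × (List (List (String × String))) :=
  ([], [], [[("severity", "high")], [("severity", "medium")], [("severity", "low")]])

def Spec_calculate_behavior_scores (df : List (List (String × String))) (patterns : List (List (String × String))) (hidden_patterns : List (List (String × String))) (out : List (String × Int)) : Prop := out = calculate_behavior_scores_alt df patterns hidden_patterns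
instance (df : List (List (String × String))) (patterns : List (List (String × String))) (hidden_patterns : List (List (String × String))) (out : List (String × Int)) : Decidable (Spec_calculate_behavior_scores df patterns hidden_patterns out) := by unfold Spec_calculate_behavior_scores; infer_instance

-- ===== CLAIM (what is proved, stated in full; the proofs are below) =====
def Claim_equal_calculate_behavior_scores : Prop := ∀ (df : List (List (String × String))) (patterns : List (List (String × String))) (hidden_patterns : List (List (String × String))), Dom_calculate_behavior_scores df patterns hidden_patterns → Pre_calculate_behavior_scores df patterns hidden_patterns → Spec_calculate_behavior_scores df patterns hidden_patterns (calculate_behavior_scores df patterns hidden_patterns)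

-- ===== LEMMAS AND PROOFS =====

-- A's fold state in terms of B's two counts
lemma fold_invariant (l : List (List (String × String))) (a b c : Int) :
    l.foldl
      (fun (s : Int × Int × Int) pattern =>
        let sev := ((List.lookup "severity" pattern).getD "")
        if sev = "high" then (s.1 - 15, s.2.1 - 15, s.2.2 + 20)
        else if sev = "medium" then (s.1 - 8, s.2.1 - 8, s.2.2 + 10)
        else s)
      (a, b, c)
    = (a - 15 * (l.countP (fun p => ((List.lookup "severity" p).getD "") = "high"))
         - 8 * (l.countP (fun p => ((List.lookup "severity" p).getD "") = "medium")),
       b - 15 * (l.countP (fun p => ((List.lookup "severity" p).getD "") = "high"))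
         - 8 * (l.countP (fun p => ((List.lookup "severity" p).getD "") = "medium")),
       c + 20 * (l.countP (fun p => ((List.lookup "severity" p).getD "") = "high"))
         + 10 * (l.countP (fun p => ((List.lookup "severity" p).getD "") = "medium"))) := by
  induction l generalizing a b c with
  | nil => simp
  | cons hd tl ih =>
    simp only [List.foldl_cons, List.countP_cons]
    by_cases hh : ((List.lookup "severity" hd).getD "") = "high"
    · have hm : ¬ ((List.lookup "severity" hd).getD "") = "medium" := by rw [hh]; decide
      simp only [hh, hm, if_true, if_false, ite_true, ite_false, decide_true, decide_false,
        ih, Nat.cast_add, Nat.cast_one, Nat.cast_zero, add_zero, Prod.mk.injEq]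
      refine ⟨by simp; ring, by simp; ring, by simp; ring⟩
    · by_cases hm : ((List.lookup "severity" hd).getD "") = "medium"
      · simp only [hh, hm, if_true, if_false, ite_true, ite_false, decide_true, decide_false,
          ih, Nat.cast_add, Nat.cast_one, Nat.cast_zero, add_zero, Prod.mk.injEq]
        refine ⟨by simp; ring, by simp; ring, by simp; ring⟩
      · simp only [hh, hm, if_false, ite_false, decide_false, ih, Nat.cast_zero, add_zero]
        simp

-- ===== VERDICT (by name: the statement is the Claim_ definition above) =====
theorem calculate_behavior_scores_spec : Claim_equal_calculate_behavior_scores := by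
  intro df patterns hp _ _
  unfold Spec_calculate_behavior_scores calculate_behavior_scores calculate_behavior_scores_alt
  rw [fold_invariant]
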